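-- pv_equiv track=rewrite | github.com/WaqasAhmed27/NLP-PDC-project | engine.py | _trim_at_rewrite_stop
-- ===== SOURCE A (Python) =====
-- from typing import Any, Iterator, Literal, Optional, TypedDict
--
-- LLAMA_REWRITE_STOP_STRINGS = (
--     "<|eot_id|>",
--     "<|end_of_text|>",
--     "<|start_header_id|>",
--     "<|reserved_special_token",
-- )
--
-- def _trim_at_rewrite_stop(chunk: str) -> tuple[str, Optional[str]]:
--     stop_index: Optional[int] = None
--     matched_stop: Optional[str] = None
--     for stop_string in LLAMA_REWRITE_STOP_STRINGS:
--         index = chunk.find(stop_string)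
--         if index != -1 and (stop_index is None or index < stop_index):
--             stop_index = index
--             matched_stop = stop_string
--
--     if stop_index is None:
--         return chunk, None
--     return chunk[:stop_index], matched_stop
-- ===== SOURCE B (Python) =====
-- from typing import Optional
--
-- LLAMA_REWRITE_STOP_STRINGS = (
--     "<|eot_id|>",
--     "<|end_of_text|>",
--     "<|start_header_id|>",
--     "<|reserved_special_token",
-- )
--
-- def _trim_at_rewrite_stop(chunk: str) -> tuple[str, Optional[str]]:
--     # single left-to-right positional scan; at each index test the stop
--     # strings in tuple order, so the earliest occurrence wins and ties at the
--     # same index are broken by tuple order, exactly as the min-of-finds does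
--     for i in range(len(chunk) + 1):
--         for stop_string in LLAMA_REWRITE_STOP_STRINGS:
--             if chunk.startswith(stop_string, i):
--                 return chunk[:i], stop_string
--     return chunk, None
-- ===== Notes on version B (the rewrite author's own statement) =====
-- stated objective: alternative
-- what changed: Replaces four separate str.find scans plus an explicit running-minimum with a single left-to-right scan over positions that tests the stop strings in tuple order at each index and returns at the first match.
import Mathlib
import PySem

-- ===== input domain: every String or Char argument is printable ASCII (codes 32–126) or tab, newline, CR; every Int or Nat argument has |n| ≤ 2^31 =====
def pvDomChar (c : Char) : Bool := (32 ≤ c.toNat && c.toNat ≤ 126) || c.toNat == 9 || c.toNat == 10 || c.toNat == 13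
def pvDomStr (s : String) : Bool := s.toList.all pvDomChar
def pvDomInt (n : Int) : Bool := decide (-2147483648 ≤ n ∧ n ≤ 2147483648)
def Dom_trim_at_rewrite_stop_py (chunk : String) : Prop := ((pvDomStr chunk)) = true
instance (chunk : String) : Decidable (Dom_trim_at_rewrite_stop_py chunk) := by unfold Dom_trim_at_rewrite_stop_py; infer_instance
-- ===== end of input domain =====

-- B replaces A's four separate find() scans + running minimum by one left-to-right
-- positional scan testing the stop strings in tuple order at each index (objective:
-- alternative decomposition, same result).

-- ===== PORT A =====
-- the module constant LLAMA_REWRITE_STOP_STRINGS (shared by both ports)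
def llamaRewriteStopStrings : List (List Char) :=
  ["<|eot_id|>".toList, "<|end_of_text|>".toList,
   "<|start_header_id|>".toList, "<|reserved_special_token".toList]

-- one iteration of A's for-loop: index = chunk.find(stop_string);
-- if index != -1 and (stop_index is None or index < stop_index): update
def trimStepA (chunkL : List Char) (st : Option Int × Option (List Char))
    (stop_string : List Char) : Option Int × Option (List Char) :=
  let index := PySem.Chars.find chunkL stop_string
  if index != -1 && (match st.1 with | none => true | some si => decide (index < si))
  then (some index, some stop_string) else st

def trim_at_rewrite_stop_py (chunk : String) : String × Option String :=
  let st := llamaRewriteStopStrings.foldl (trimStepA chunk.toList) (none, none)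
  match st.1 with
  | none => (chunk, none)
  | some si =>
    (String.ofList (PySem.List.slice chunk.toList none (some si)), st.2.map String.ofList)

-- ===== PORT B =====
-- first stop string (in tuple order) that chunk starts with at the current position
def stopHereB (suf : List Char) : Option (List Char) :=
  llamaRewriteStopStrings.find? (fun s => PySem.Chars.startswith suf s)

-- Source B's scan 'for i in range(len(chunk) + 1)': chunk.startswith(s, i) is exactly
-- startswith on the i-th suffix, so the scan is recursion on the suffix
def scanB : List Char → Nat → Option (Nat × List Char)
  | [], i => match stopHereB [] with | some s => some (i, s) | none => none
  | c :: t, i => match stopHereB (c :: t) with | some s => some (i, s) | none => scanB t (i + 1)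

def trim_at_rewrite_stop_py_alt (chunk : String) : String × Option String :=
  match scanB chunk.toList 0 with
  | some (i, s) => (String.ofList (chunk.toList.take i), some (String.ofList s))
  | none => (chunk, none)

-- ===== PRECONDITION & SPEC =====
def Spec_trim_at_rewrite_stop_py (chunk : String) (out : String × Option String) : Prop := out = trim_at_rewrite_stop_py_alt chunk
instance (chunk : String) (out : String × Option String) : Decidable (Spec_trim_at_rewrite_stop_py chunk out) := by unfold Spec_trim_at_rewrite_stop_py; infer_instance

-- ===== CLAIM (what is proved, stated in full; the proofs are below) =====
def Claim_equal_trim_at_rewrite_stop_py : Prop := ∀ (chunk : String), Dom_trim_at_rewrite_stop_py chunk → Spec_trim_at_rewrite_stop_py chunk (trim_at_rewrite_stop_py chunk)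

-- ===== LEMMAS AND PROOFS =====

-- B's scan found nothing: no stop string starts at any position
theorem scanB_none (suf : List Char) (i : Nat) (h : scanB suf i = none) :
    ∀ j, stopHereB (suf.drop j) = none := by
  induction suf generalizing i with
  | nil =>
    intro j
    simp only [scanB] at h
    cases hc : stopHereB ([] : List Char) with
    | none => simpa using hc
    | some s => rw [hc] at h; simp at h
  | cons c t ih =>
    intro j
    simp only [scanB] at h
    cases hc : stopHereB (c :: t) with
    | none =>
      rw [hc] at h
      cases j with
      | zero => simpa using hc
      | succ k => simpa using ih (i + 1) h k
    | some s => rw [hc] at h; simp at h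

-- B's scan found (r, s): r = i + j for the first position j with a match, s the
-- first stop string matching there
theorem scanB_some (suf : List Char) (i r : Nat) (s : List Char)
    (h : scanB suf i = some (r, s)) :
    ∃ j, r = i + j ∧ stopHereB (suf.drop j) = some s ∧
      ∀ k < j, stopHereB (suf.drop k) = none := by
  induction suf generalizing i with
  | nil =>
    simp only [scanB] at h
    cases hc : stopHereB ([] : List Char) with
    | none => rw [hc] at h; simp at h
    | some s' =>
      rw [hc] at h
      simp only [Option.some.injEq, Prod.mk.injEq] at h
      exact ⟨0, by omega, by simpa [← h.2] using hc,
        fun k hk => absurd hk (Nat.not_lt_zero k)⟩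
  | cons c t ih =>
    simp only [scanB] at h
    cases hc : stopHereB (c :: t) with
    | none =>
      rw [hc] at h
      obtain ⟨j, hr, hj, hk⟩ := ih (i + 1) h
      refine ⟨j + 1, by omega, by simpa using hj, ?_⟩
      intro k hk'
      cases k with
      | zero => simpa using hc
      | succ k' => simpa using hk k' (by omega)
    | some s' =>
      rw [hc] at h
      simp only [Option.some.injEq, Prod.mk.injEq] at h
      exact ⟨0, by omega, by simpa [← h.2] using hc,
        fun k hk => absurd hk (Nat.not_lt_zero k)⟩

-- if q starts at no position below j, then find is -1 or ≥ j
theorem find_ge_of_not_before (L q : List Char) (j : Nat)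
    (h : ∀ k < j, ¬ q <+: L.drop k) :
    PySem.Chars.find L q = -1 ∨ (j : Int) ≤ PySem.Chars.find L q := by
  by_cases hne : PySem.Chars.find L q = -1
  · exact Or.inl hne
  · right
    have hnn : 0 ≤ PySem.Chars.find L q := by
      rw [PySem.Chars.find_nonneg_iff]
      by_contra hinf
      exact hne ((PySem.Chars.find_eq_neg_one_iff L q).mpr hinf)
    obtain ⟨hpre, _⟩ := PySem.Chars.find_spec hnn
    by_contra hlt
    rw [not_le] at hlt
    have : (PySem.Chars.find L q).toNat < j := by omega
    exact h _ this hpre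

-- if q first starts at position j, then find = j
theorem find_eq_of_first (L q : List Char) (j : Nat)
    (hj : q <+: L.drop j) (h : ∀ k < j, ¬ q <+: L.drop k) :
    PySem.Chars.find L q = (j : Int) := by
  have hnn : 0 ≤ PySem.Chars.find L q := by
    rw [PySem.Chars.find_nonneg_iff, ← PySem.Chars.isIn_iff_infix,
      ← PySem.Chars.exists_prefix_drop_iff_isIn]
    exact ⟨j, hj⟩
  obtain ⟨hpre, hmin⟩ := PySem.Chars.find_spec hnn
  rcases lt_trichotomy (PySem.Chars.find L q).toNat j with hlt | heq | hgt
  · exact absurd hpre (h _ hlt)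
  · omega
  · exact absurd hj (hmin j hgt)

-- A's fold leaves any state alone when every remaining find is -1 or ≥ the held index
theorem foldA_skip (L : List Char) (l : List (List Char))
    (st : Option Int × Option (List Char)) (j : Int) (hst : st.1 = some j)
    (h : ∀ q ∈ l, PySem.Chars.find L q = -1 ∨ j ≤ PySem.Chars.find L q) :
    l.foldl (trimStepA L) st = st := by
  induction l with
  | nil => rfl
  | cons q t ih =>
    have hstep : trimStepA L st q = st := by
      rcases h q (by simp) with hq | hq
      · simp [trimStepA, hq]
      · simp [trimStepA, hst]
        intro h1 h2
        omega
    rw [List.foldl_cons, hstep]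
    exact ih (fun q hq => h q (by simp [hq]))

-- invariant of A's fold over stop strings whose find is -1 or > j:
-- the held index stays absent or > j
theorem foldA_inv (L : List Char) (l : List (List Char))
    (st : Option Int × Option (List Char)) (j : Int)
    (hst : st.1 = none ∨ ∃ m, st.1 = some m ∧ j < m)
    (h : ∀ q ∈ l, PySem.Chars.find L q = -1 ∨ j < PySem.Chars.find L q) :
    (l.foldl (trimStepA L) st).1 = none ∨
      ∃ m, (l.foldl (trimStepA L) st).1 = some m ∧ j < m := by
  induction l generalizing st with
  | nil => simpa using hst
  | cons q t ih =>
    rw [List.foldl_cons]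
    refine ih (trimStepA L st q) ?_ (fun q hq => h q (by simp [hq]))
    rcases h q (by simp) with hq | hq
    · have hid : trimStepA L st q = st := by simp [trimStepA, hq]
      rw [hid]; exact hst
    · by_cases hc : (PySem.Chars.find L q != -1 &&
        (match st.1 with | none => true | some si => decide (PySem.Chars.find L q < si))) = true
      · have hset : trimStepA L st q = (some (PySem.Chars.find L q), some q) := by
          simp only [trimStepA]
          rw [if_pos hc]
        rw [hset]; exact Or.inr ⟨_, rfl, hq⟩
      · have hid : trimStepA L st q = st := by
          simp only [trimStepA]
          rw [if_neg (by simpa using hc)]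
        rw [hid]; exact hst

-- A's fold is the identity when every find is -1
theorem foldA_none (L : List Char) (l : List (List Char))
    (st : Option Int × Option (List Char))
    (h : ∀ q ∈ l, PySem.Chars.find L q = -1) :
    l.foldl (trimStepA L) st = st := by
  induction l generalizing st with
  | nil => rfl
  | cons q t ih =>
    rw [List.foldl_cons]
    have hid : trimStepA L st q = st := by simp [trimStepA, h q (by simp)]
    rw [hid]
    exact ih st (fun q hq => h q (by simp [hq]))

-- from 'no stop string starts at position k': no q ∈ stops is a prefix of drop k
theorem not_prefix_of_stopHereB_none (suf : List Char)
    (h : stopHereB suf = none) : ∀ q ∈ llamaRewriteStopStrings, ¬ q <+: suf := by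
  intro q hq
  have := List.find?_eq_none.mp h q hq
  rw [← PySem.Chars.startswith_iff suf q]
  simpa using this

-- ===== VERDICT (by name: the statement is the Claim_ definition above) =====
theorem trim_at_rewrite_stop_py_spec : Claim_equal_trim_at_rewrite_stop_py := by
  intro chunk _
  unfold Spec_trim_at_rewrite_stop_py trim_at_rewrite_stop_py trim_at_rewrite_stop_py_alt
  set L := chunk.toList with hL
  cases hscan : scanB L 0 with
  | none =>
    -- no stop string anywhere: every find is -1, A's fold never updates
    have hall : ∀ q ∈ llamaRewriteStopStrings, PySem.Chars.find L q = -1 := by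
      intro q hq
      rw [PySem.Chars.find_eq_neg_one_iff, ← PySem.Chars.isIn_iff_infix,
        ← PySem.Chars.exists_prefix_drop_iff_isIn]
      rintro ⟨j, hj⟩
      exact not_prefix_of_stopHereB_none _ (scanB_none L 0 hscan j) q hq hj
    have hfold : llamaRewriteStopStrings.foldl (trimStepA L) (none, none) = (none, none) :=
      foldA_none L _ (none, none) hall
    simp [hfold]
  | some rs =>
    obtain ⟨r, s⟩ := rs
    obtain ⟨j, hr, hjsome, hknone⟩ := scanB_some L 0 r s hscan
    -- decompose the tuple at the first matching stop string
    rw [stopHereB, List.find?_eq_some_iff_append] at hjsome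
    obtain ⟨hsw, l₁, l₂, hsplit, hpre₁⟩ := hjsome
    have hs_pref : s <+: L.drop j := (PySem.Chars.startswith_iff _ s).mp hsw
    have hmem : ∀ q ∈ llamaRewriteStopStrings, ∀ k < j, ¬ q <+: L.drop k := by
      intro q hq k hk
      exact not_prefix_of_stopHereB_none _ (hknone k hk) q hq
    have hmem_s : s ∈ llamaRewriteStopStrings := by rw [hsplit]; simp
    have hfind_s : PySem.Chars.find L s = (j : Int) :=
      find_eq_of_first L s j hs_pref (hmem s hmem_s)
    -- stop strings before s: find = -1 or > j (they fail at every k ≤ j)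
    have h₁ : ∀ q ∈ l₁, PySem.Chars.find L q = -1 ∨ (j : Int) < PySem.Chars.find L q := by
      intro q hq
      have hq' : q ∈ llamaRewriteStopStrings := by rw [hsplit]; simp [hq]
      have hbelow : ∀ k < j + 1, ¬ q <+: L.drop k := by
        intro k hk
        rcases Nat.lt_succ_iff_lt_or_eq.mp hk with hk' | hk'
        · exact hmem q hq' k hk'
        · subst hk'
          have hbs := hpre₁ q hq
          intro hpref
          rw [← PySem.Chars.startswith_iff (L.drop k) q] at hpref
          simp [hpref] at hbs
      rcases find_ge_of_not_before L q (j + 1) hbelow with h | h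
      · exact Or.inl h
      · right; push_cast at h ⊢; omega
    -- stop strings after s: find = -1 or ≥ j
    have h₂ : ∀ q ∈ l₂, PySem.Chars.find L q = -1 ∨ (j : Int) ≤ PySem.Chars.find L q := by
      intro q hq
      have hq' : q ∈ llamaRewriteStopStrings := by rw [hsplit]; simp [hq]
      exact find_ge_of_not_before L q j (hmem q hq')
    -- run A's fold: l₁ keeps the invariant, s installs (j, s), l₂ changes nothing
    have hst₁ := foldA_inv L l₁ (none, none) (j : Int) (Or.inl rfl) h₁
    have hjne : ((j : Int) != -1) = true := by simp
    have hstep : trimStepA L (l₁.foldl (trimStepA L) (none, none)) s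
        = (some (j : Int), some s) := by
      rcases hst₁ with h0 | ⟨m, hm, hjm⟩
      · simp [trimStepA, hfind_s, h0, hjne]
      · simp [trimStepA, hfind_s, hm, hjm, hjne]
    have hfold : llamaRewriteStopStrings.foldl (trimStepA L) (none, none)
        = (some (j : Int), some s) := by
      rw [hsplit, List.foldl_append, List.foldl_cons, hstep]
      exact foldA_skip L l₂ _ (j : Int) rfl h₂
    have hslice : PySem.List.slice L none (some (j : Int)) = L.take j := by
      rw [PySem.List.slice_to L (by positivity)]
      simp
    simp [hfold, hslice, hr]
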